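-- pv_equiv track=rewrite | github.com/pypi-data/pypi-mirror-333 | packages/tinyfan/tinyfan-0.2.5-py3-none-any.whl/tinyfan/utils/merge.py | dropnone
-- ===== SOURCE A (Python) =====
-- def dropnone(d: dict) -> dict:
--     dropping = []
--     for k in d:
--         if d[k] is None:
--             dropping.append(k)
--     for k in dropping:
--         del d[k]
--     return d
-- ===== SOURCE B (Python) =====
-- def dropnone(d: dict) -> dict:
--     kept = {k: v for k, v in d.items() if v is not None}
--     d.clear()
--     d.update(kept)
--     return d
-- ===== Notes on version B (the rewrite author's own statement) =====
-- stated objective: idiomatic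
-- what changed: B builds the dict of kept (non-None) entries with a comprehension and rebuilds d in place via clear()+update(), instead of A's collecting keys-to-drop in a list and deleting them one by one.
import Mathlib
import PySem

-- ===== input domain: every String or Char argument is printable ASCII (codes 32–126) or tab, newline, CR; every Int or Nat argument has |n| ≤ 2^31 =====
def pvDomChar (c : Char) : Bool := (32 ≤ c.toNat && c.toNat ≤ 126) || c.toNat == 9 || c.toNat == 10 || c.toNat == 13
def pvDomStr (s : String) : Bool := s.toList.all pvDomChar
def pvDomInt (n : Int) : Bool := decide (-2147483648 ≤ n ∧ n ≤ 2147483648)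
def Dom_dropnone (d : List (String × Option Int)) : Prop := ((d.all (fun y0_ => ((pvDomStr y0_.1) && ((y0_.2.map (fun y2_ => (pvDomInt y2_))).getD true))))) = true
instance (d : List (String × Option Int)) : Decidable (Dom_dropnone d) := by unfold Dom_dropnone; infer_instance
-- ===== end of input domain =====

-- B rebuilds the dict from the kept (non-None) entries instead of deleting collected keys one
-- by one; return-value equivalence (both Pythons also mutate d in place to the same contents).

-- ===== PORT A =====
def dropnone (d : List (String × Option Int)) : List (String × Option Int) :=
  let dd := PySem.Dict.ofList d
  let dropping := dd.keys.foldl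
    (fun acc k => if dd.get? k = some none then acc ++ [k] else acc) []
  (dropping.foldl (fun cur k => cur.erase k) dd).items

-- ===== PORT B =====
def dropnone_alt (d : List (String × Option Int)) : List (String × Option Int) :=
  let dd := PySem.Dict.ofList d
  let kept := dd.items.foldl
    (fun acc kv => if kv.2 ≠ none then acc.insert kv.1 kv.2 else acc) PySem.Dict.empty
  -- d.clear(); d.update(kept); return d  → the result's items are kept's items
  kept.items

-- ===== PRECONDITION & SPEC =====
def Spec_dropnone (d : List (String × Option Int)) (out : List (String × Option Int)) : Prop := out = dropnone_alt d
instance (d : List (String × Option Int)) (out : List (String × Option Int)) : Decidable (Spec_dropnone d out) := by unfold Spec_dropnone; infer_instance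

-- ===== CLAIM (what is proved, stated in full; the proofs are below) =====
def Claim_equal_dropnone : Prop := ∀ (d : List (String × Option Int)), Dom_dropnone d → Spec_dropnone d (dropnone d)

-- ===== LEMMAS AND PROOFS =====

-- folding `erase` over a list of keys filters the items to the keys not in the list
theorem items_foldl_erase (ks : List String) (dd : PySem.Dict String (Option Int)) :
    (ks.foldl (fun cur k => cur.erase k) dd).items
      = dd.items.filter (fun p => !ks.contains p.1) := by
  induction ks generalizing dd with
  | nil => simp
  | cons k ks ih =>
    rw [List.foldl_cons, ih]
    simp only [PySem.Dict.erase, List.filter_filter]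
    apply List.filter_congr
    intro p _
    simp only [List.contains_cons, Bool.not_or, Bool.and_comm]

-- B's insert loop over items with Nodup keys just reproduces the filtered items
theorem kept_items (dd : PySem.Dict String (Option Int)) (hnd : dd.keys.Nodup) :
    (dd.items.foldl
      (fun acc kv => if kv.2 ≠ none then acc.insert kv.1 kv.2 else acc)
      PySem.Dict.empty).items
      = dd.items.filter (fun p => decide (p.2 ≠ none)) := by
  have hfold :
      (dd.items.foldl
        (fun acc kv => if kv.2 ≠ none then acc.insert kv.1 kv.2 else acc)
        PySem.Dict.empty)
      = ((dd.items.filter (fun p => decide (p.2 ≠ none))).foldl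
          (fun acc kv => acc.insert kv.1 kv.2) PySem.Dict.empty) := by
    rw [List.foldl_filter]
    apply PySem.List.foldl_congr_mem
    intro acc x _
    by_cases h : x.2 = none <;> simp [h]
  rw [hfold]
  have hsub : List.Sublist ((dd.items.filter (fun p => decide (p.2 ≠ none))).map Prod.fst) dd.keys :=
    List.Sublist.map Prod.fst List.filter_sublist
  rw [PySem.Dict.items_foldl_insert_fresh _ _ _ _
    (by intro a _; simp [PySem.Dict.contains_empty]) (hnd.sublist hsub)]
  simp [PySem.Dict.empty]

theorem get?_some_none_iff (dd : PySem.Dict String (Option Int)) (hnd : dd.keys.Nodup)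
    (p : String × Option Int) (hp : p ∈ dd.items) :
    dd.get? p.1 = some none ↔ p.2 = none := by
  have h := PySem.Dict.get?_of_mem_items (d := dd) (k := p.1) (v := p.2) (by simpa using hp) hnd
  rw [h]
  simp

-- ===== VERDICT (by name: the statement is the Claim_ definition above) =====
theorem dropnone_spec : Claim_equal_dropnone := by
  intro d _
  simp only [Spec_dropnone, dropnone, dropnone_alt]
  set dd := PySem.Dict.ofList d with hdd
  have hnd : dd.keys.Nodup := PySem.Dict.nodup_keys_ofList d
  rw [PySem.List.foldl_append_ite_eq_filter, items_foldl_erase, kept_items dd hnd]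
  apply List.filter_congr
  intro p hp
  have hg := get?_some_none_iff dd hnd p hp
  have hkey : p.1 ∈ dd.keys := PySem.Dict.mem_keys_of_mem_items dd hp
  simp only [List.nil_append, Bool.not_eq_eq_eq_not]
  by_cases h : p.2 = none
  · simp [h, List.mem_filter, hkey, hg.mpr h]
  · have hnm : p.1 ∉ List.filter (fun x => decide (dd.get? x = some none)) dd.keys := by
      simp only [List.mem_filter, decide_eq_true_eq, not_and]
      intro _ hgp
      exact h (hg.mp hgp)
    simp [h, hnm]
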